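-- pv_equiv track=rewrite | github.com/DanieIoZ/Studies_git | python/Reversi/reversi/playerzzz_old.py | get_biggest_moves
-- ===== SOURCE A (Python) =====
-- def get_biggest_moves(moves):
--     best_moves = []
--     if (len(moves) == 0):
--         return None
--
--     max_cv = max([d[2] for d in moves])
--     for i in range(len(moves)):
--         if (moves[i][2] == max_cv):
--             best_moves.append(moves[i])
--
--     max_mv = max([d[1] for d in best_moves])
--     for i in range(len(best_moves), 0):
--         if (best_moves[i][1] != max_mv):
--             best_moves.remove(moves[i])
--     return best_moves
-- ===== SOURCE B (Python) =====
-- def get_biggest_moves(moves):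
--     if not moves:
--         return None
--     best_val = moves[0][2]
--     best = [moves[0]]
--     for move in moves[1:]:
--         v = move[2]
--         if v > best_val:
--             best_val = v
--             best = [move]
--         elif v == best_val:
--             best.append(move)
--     return best
-- ===== Notes on version B (the rewrite author's own statement) =====
-- stated objective: simpler
-- what changed: Replaced the two-pass max-then-filter (plus an inert third loop over an empty range) with a single streaming pass that maintains the running maximum third component and the list of moves attaining it.
import Mathlib
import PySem

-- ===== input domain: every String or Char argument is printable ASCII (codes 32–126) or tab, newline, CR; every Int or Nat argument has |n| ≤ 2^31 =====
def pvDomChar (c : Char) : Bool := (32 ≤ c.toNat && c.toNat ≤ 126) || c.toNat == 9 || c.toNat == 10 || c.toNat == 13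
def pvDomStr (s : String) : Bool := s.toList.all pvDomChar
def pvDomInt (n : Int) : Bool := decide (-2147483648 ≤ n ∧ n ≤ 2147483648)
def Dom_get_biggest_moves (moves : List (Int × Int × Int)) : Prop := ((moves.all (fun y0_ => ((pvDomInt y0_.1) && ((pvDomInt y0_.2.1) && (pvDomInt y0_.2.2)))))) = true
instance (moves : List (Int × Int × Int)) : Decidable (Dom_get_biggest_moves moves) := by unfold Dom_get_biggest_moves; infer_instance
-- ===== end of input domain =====

-- B replaces A's max-then-filter passes (and A's inert third loop over an empty range)
-- by one streaming pass keeping the running max and its ties; return value only is compared.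

-- ===== PORT A =====
-- max([...]) on the provably non-empty lists is ported as max? with .getD 0 (the none case is unreachable).
def get_biggest_moves (moves : List (Int × Int × Int)) : Option (List (Int × Int × Int)) :=
  if moves.length = 0 then none
  else
    let max_cv : Int := (PySem.List.max? (moves.map (fun d => d.2.2)) (fun y => y)).getD 0
    let best_moves :=
      (PySem.List.pyRange 0 (moves.length : Int) 1).foldl
        (fun acc i =>
          if (PySem.List.pyGetD moves i (0, 0, 0)).2.2 == max_cv then
            acc ++ [PySem.List.pyGetD moves i (0, 0, 0)]
          else acc) []
    let max_mv : Int := (PySem.List.max? (best_moves.map (fun d => d.2.1)) (fun y => y)).getD 0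
    -- for i in range(len(best_moves), 0): … (an empty range; ported literally)
    let best_moves2 :=
      (PySem.List.pyRange (best_moves.length : Int) 0 1).foldl
        (fun acc i =>
          if (PySem.List.pyGetD acc i (0, 0, 0)).2.1 != max_mv then
            (PySem.List.remove? acc (PySem.List.pyGetD moves i (0, 0, 0))).getD acc
          else acc) best_moves
    some best_moves2

-- ===== PORT B =====
def get_biggest_moves_alt (moves : List (Int × Int × Int)) : Option (List (Int × Int × Int)) :=
  match moves with
  | [] => none
  | m :: rest =>
    some ((rest.foldl
      (fun s mv =>
        if mv.2.2 > s.2 then ([mv], mv.2.2)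
        else if mv.2.2 == s.2 then (s.1 ++ [mv], s.2)
        else s) ([m], m.2.2)).1)

-- ===== PRECONDITION & SPEC =====
def Spec_get_biggest_moves (moves : List (Int × Int × Int)) (out : Option (List (Int × Int × Int))) : Prop := out = get_biggest_moves_alt moves
instance (moves : List (Int × Int × Int)) (out : Option (List (Int × Int × Int))) : Decidable (Spec_get_biggest_moves moves out) := by unfold Spec_get_biggest_moves; infer_instance

-- ===== CLAIM (what is proved, stated in full; the proofs are below) =====
def Claim_equal_get_biggest_moves : Prop := ∀ (moves : List (Int × Int × Int)), Dom_get_biggest_moves moves → Spec_get_biggest_moves moves (get_biggest_moves moves)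

-- ===== LEMMAS AND PROOFS =====

-- B's streaming fold, characterised: starting from the ties-of-b among pref (all of whose
-- third components are ≤ b), folding rest yields the ties of the overall running max.
theorem altFold_char (rest : List (Int × Int × Int)) :
    ∀ (pref : List (Int × Int × Int)) (b : Int),
    (∀ y ∈ pref, y.2.2 ≤ b) →
    rest.foldl
      (fun s mv =>
        if mv.2.2 > s.2 then ([mv], mv.2.2)
        else if mv.2.2 == s.2 then (s.1 ++ [mv], s.2)
        else s) (pref.filter (fun y => y.2.2 == b), b)
    = ((pref ++ rest).filter
        (fun y => y.2.2 == rest.foldl (fun m x => max m x.2.2) b),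
       rest.foldl (fun m x => max m x.2.2) b) := by
  induction rest with
  | nil => intro pref b _; simp
  | cons x rest ih =>
    intro pref b hb
    simp only [List.foldl_cons]
    by_cases hgt : x.2.2 > b
    · rw [if_pos hgt]
      have h1 : pref.filter (fun y => y.2.2 == x.2.2) = [] := by
        rw [List.filter_eq_nil_iff]
        intro y hy
        have := hb y hy
        simp only [beq_iff_eq]
        omega
      have h2 : ([x] : List (Int × Int × Int)) = (pref ++ [x]).filter (fun y => y.2.2 == x.2.2) := by
        simp [h1]
      have hb' : ∀ y ∈ pref ++ [x], y.2.2 ≤ x.2.2 := by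
        intro y hy
        rcases List.mem_append.mp hy with h | h
        · exact le_of_lt (lt_of_le_of_lt (hb y h) hgt)
        · simp at h; subst h; exact le_refl _
      have hmax : max b x.2.2 = x.2.2 := by omega
      rw [h2, ih (pref ++ [x]) x.2.2 hb']
      simp [hmax]
    · rw [if_neg hgt]
      have hmax : max b x.2.2 = b := by omega
      have hb' : ∀ y ∈ pref ++ [x], y.2.2 ≤ b := by
        intro y hy
        rcases List.mem_append.mp hy with h | h
        · exact hb y h
        · simp at h; subst h; omega
      by_cases heq : x.2.2 = b
      · rw [if_pos (by simpa using heq)]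
        have h2 : pref.filter (fun y => y.2.2 == b) ++ [x]
            = (pref ++ [x]).filter (fun y => y.2.2 == b) := by
          simp [heq]
        rw [h2, ih (pref ++ [x]) b hb']
        simp [hmax]
      · rw [if_neg (by simpa using heq)]
        have h2 : pref.filter (fun y => y.2.2 == b)
            = (pref ++ [x]).filter (fun y => y.2.2 == b) := by
          simp [heq]
        rw [h2, ih (pref ++ [x]) b hb']
        simp [hmax]

-- an empty python range(n, 0) for a natural n, in a simp-friendly form
theorem pyRange_natCast_zero_nil (n : Nat) : PySem.List.pyRange (n : Int) 0 1 = [] :=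
  PySem.List.pyRange_one_eq_nil (Int.natCast_nonneg n)

-- ===== VERDICT (by name: the statement is the Claim_ definition above) =====
theorem get_biggest_moves_spec : Claim_equal_get_biggest_moves := by
  intro moves _
  unfold Spec_get_biggest_moves get_biggest_moves get_biggest_moves_alt
  cases moves with
  | nil => simp
  | cons m rest =>
    rw [if_neg (by simp)]
    -- the trailing loop runs over an empty range
    simp only [pyRange_natCast_zero_nil, List.foldl_nil]
    -- the first loop over indices is a fold over the list itself
    rw [PySem.List.foldl_pyRange_zero_pyGetD' (m :: rest) (0, 0, 0)
      (fun acc y => if y.2.2 == (PySem.List.max? ((m :: rest).map (fun d => d.2.2)) (fun y => y)).getD 0 then acc ++ [y] else acc) []]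
    rw [PySem.List.foldl_append_if_eq_filter]
    -- max([...]) is the running-max loop
    rw [List.map_cons, PySem.List.max?_id_cons]
    simp only [Option.getD_some, List.nil_append]
    -- B's side via the fold characterisation seeded with pref = [m]
    have hseed : ([m] : List (Int × Int × Int)).filter (fun y => y.2.2 == m.2.2) = [m] := by simp
    have := altFold_char rest [m] m.2.2 (by intro y hy; simp at hy; subst hy; exact le_refl _)
    rw [hseed] at this
    rw [this]
    simp [List.foldl_map]
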